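-- pv_equiv track=rewrite | github.com/SprytnyModrzew/DES | preprocessing.py | preprocess_rgb
-- ===== SOURCE A (Python) =====
-- def preprocess_rgb(r1, g1, b1, r2, g2, b2):
--     length = len(r2)
--     m = length-1
--     xor_r = []
--     xor_g = []
--     xor_b = []
--     for i in range(length):
--         xor_r.append(r1[i] ^ r2[m])
--         xor_g.append(g1[i] ^ g2[m])
--         xor_b.append(b1[i] ^ b2[m])
--         m = m-1
--
--     z = []
--     for i in range(length):
--         z.append(xor_r[i])
--         z.append(xor_g[i])
--         z.append(xor_b[i])
--
--     return z
-- ===== SOURCE B (Python) =====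
-- def preprocess_rgb(r1, g1, b1, r2, g2, b2):
--     length = len(r2)
--     z = []
--     for i in range(length):
--         j = length - 1 - i
--         z.append(r1[i] ^ r2[j])
--         z.append(g1[i] ^ g2[j])
--         z.append(b1[i] ^ b2[j])
--     return z
-- ===== Notes on version B (the rewrite author's own statement) =====
-- stated objective: simpler
-- what changed: Replaced the two-phase algorithm (build three xor buffers with a decrementing counter, then interleave them in a second loop) by a single pass that computes the reversed index as length-1-i and emits the three interleaved xor values directly.
import Mathlib
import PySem

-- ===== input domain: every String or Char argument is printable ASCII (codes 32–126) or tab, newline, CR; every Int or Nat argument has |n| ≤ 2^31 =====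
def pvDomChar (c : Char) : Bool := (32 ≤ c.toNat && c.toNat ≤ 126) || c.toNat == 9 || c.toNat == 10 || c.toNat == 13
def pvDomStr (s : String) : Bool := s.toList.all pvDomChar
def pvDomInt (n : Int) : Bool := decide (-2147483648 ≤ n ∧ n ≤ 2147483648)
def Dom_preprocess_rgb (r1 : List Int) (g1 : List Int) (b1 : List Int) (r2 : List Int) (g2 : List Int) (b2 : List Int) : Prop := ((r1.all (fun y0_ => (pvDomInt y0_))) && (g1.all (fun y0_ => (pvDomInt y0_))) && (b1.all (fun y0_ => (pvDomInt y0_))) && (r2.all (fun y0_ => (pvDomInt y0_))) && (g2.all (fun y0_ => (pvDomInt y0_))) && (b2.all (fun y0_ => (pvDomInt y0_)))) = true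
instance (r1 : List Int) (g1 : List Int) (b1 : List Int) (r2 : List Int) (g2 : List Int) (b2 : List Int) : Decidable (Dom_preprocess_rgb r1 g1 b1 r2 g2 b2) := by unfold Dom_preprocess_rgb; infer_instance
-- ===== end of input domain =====

-- B replaces A's two-phase scheme (three xor buffers via a decrementing counter, then an
-- interleaving loop) with a single pass that indexes the reversed position directly (simpler).


-- ===== PORT A =====
-- First loop: state (xor_r, xor_g, xor_b, m); Pre_ keeps every pyGetD index in range,
-- so the default 0 is never read.
def preprocess_rgb (r1 : List Int) (g1 : List Int) (b1 : List Int) (r2 : List Int) (g2 : List Int) (b2 : List Int) : List Int :=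
  let length : Int := r2.length
  let st :=
    (PySem.List.pyRange 0 length 1).foldl
      (fun (s : List Int × List Int × List Int × Int) i =>
        (s.1 ++ [PySem.Int.bxor (PySem.List.pyGetD r1 i 0) (PySem.List.pyGetD r2 s.2.2.2 0)],
         s.2.1 ++ [PySem.Int.bxor (PySem.List.pyGetD g1 i 0) (PySem.List.pyGetD g2 s.2.2.2 0)],
         s.2.2.1 ++ [PySem.Int.bxor (PySem.List.pyGetD b1 i 0) (PySem.List.pyGetD b2 s.2.2.2 0)],
         s.2.2.2 - 1))
      ([], [], [], length - 1)
  (PySem.List.pyRange 0 length 1).foldl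
    (fun z i =>
      z ++ [PySem.List.pyGetD st.1 i 0] ++ [PySem.List.pyGetD st.2.1 i 0] ++ [PySem.List.pyGetD st.2.2.1 i 0])
    []

-- ===== PORT B =====
def preprocess_rgb_alt (r1 : List Int) (g1 : List Int) (b1 : List Int) (r2 : List Int) (g2 : List Int) (b2 : List Int) : List Int :=
  let length : Int := r2.length
  (PySem.List.pyRange 0 length 1).foldl
    (fun z i =>
      let j := length - 1 - i
      z ++ [PySem.Int.bxor (PySem.List.pyGetD r1 i 0) (PySem.List.pyGetD r2 j 0)]
        ++ [PySem.Int.bxor (PySem.List.pyGetD g1 i 0) (PySem.List.pyGetD g2 j 0)]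
        ++ [PySem.Int.bxor (PySem.List.pyGetD b1 i 0) (PySem.List.pyGetD b2 j 0)])
    []

-- ===== PRECONDITION & SPEC =====
-- Python A raises IndexError when r1, g1, b1, g2 or b2 is shorter than r2; Pre_ excludes exactly that.
def Pre_preprocess_rgb (r1 : List Int) (g1 : List Int) (b1 : List Int) (r2 : List Int) (g2 : List Int) (b2 : List Int) : Prop :=
  r2.length ≤ r1.length ∧ r2.length ≤ g1.length ∧ r2.length ≤ b1.length ∧
  r2.length ≤ g2.length ∧ r2.length ≤ b2.length
instance (r1 : List Int) (g1 : List Int) (b1 : List Int) (r2 : List Int) (g2 : List Int) (b2 : List Int) : Decidable (Pre_preprocess_rgb r1 g1 b1 r2 g2 b2) := by unfold Pre_preprocess_rgb; infer_instance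

def pvWitness_preprocess_rgb : List Int × List Int × List Int × List Int × List Int × List Int :=
  ([1, 2], [3, 4], [5, 6], [7, 8], [9, 10], [11, 12])

def Spec_preprocess_rgb (r1 : List Int) (g1 : List Int) (b1 : List Int) (r2 : List Int) (g2 : List Int) (b2 : List Int) (out : List Int) : Prop := out = preprocess_rgb_alt r1 g1 b1 r2 g2 b2
instance (r1 : List Int) (g1 : List Int) (b1 : List Int) (r2 : List Int) (g2 : List Int) (b2 : List Int) (out : List Int) : Decidable (Spec_preprocess_rgb r1 g1 b1 r2 g2 b2 out) := by unfold Spec_preprocess_rgb; infer_instance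

-- ===== CLAIM (what is proved, stated in full; the proofs are below) =====
def Claim_equal_preprocess_rgb : Prop := ∀ (r1 : List Int) (g1 : List Int) (b1 : List Int) (r2 : List Int) (g2 : List Int) (b2 : List Int), Dom_preprocess_rgb r1 g1 b1 r2 g2 b2 → Pre_preprocess_rgb r1 g1 b1 r2 g2 b2 → Spec_preprocess_rgb r1 g1 b1 r2 g2 b2 (preprocess_rgb r1 g1 b1 r2 g2 b2)

-- ===== LEMMAS AND PROOFS =====

-- A's first loop, characterised: after folding over range(n), the three buffers are maps
-- over the range and the counter m has dropped to L-1-n.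
theorem preprocess_rgb_loop1
    (r1 g1 b1 r2 g2 b2 : List Int) (L : Int) (n : Nat) :
    (PySem.List.pyRange 0 (n : Int) 1).foldl
      (fun (s : List Int × List Int × List Int × Int) i =>
        (s.1 ++ [PySem.Int.bxor (PySem.List.pyGetD r1 i 0) (PySem.List.pyGetD r2 s.2.2.2 0)],
         s.2.1 ++ [PySem.Int.bxor (PySem.List.pyGetD g1 i 0) (PySem.List.pyGetD g2 s.2.2.2 0)],
         s.2.2.1 ++ [PySem.Int.bxor (PySem.List.pyGetD b1 i 0) (PySem.List.pyGetD b2 s.2.2.2 0)],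
         s.2.2.2 - 1))
      ([], [], [], L - 1)
    = ((PySem.List.pyRange 0 (n : Int) 1).map
         (fun i => PySem.Int.bxor (PySem.List.pyGetD r1 i 0) (PySem.List.pyGetD r2 (L - 1 - i) 0)),
       (PySem.List.pyRange 0 (n : Int) 1).map
         (fun i => PySem.Int.bxor (PySem.List.pyGetD g1 i 0) (PySem.List.pyGetD g2 (L - 1 - i) 0)),
       (PySem.List.pyRange 0 (n : Int) 1).map
         (fun i => PySem.Int.bxor (PySem.List.pyGetD b1 i 0) (PySem.List.pyGetD b2 (L - 1 - i) 0)),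
       L - 1 - n) := by
  induction n with
  | zero => simp [PySem.List.pyRange]
  | succ k ih =>
      have h : ((k : Int) + 1) = ((k + 1 : Nat) : Int) := by push_cast; ring
      rw [← h, PySem.List.pyRange_one_succ_right (by positivity)]
      simp only [List.foldl_append, List.map_append, List.foldl_cons, List.foldl_nil,
        List.map_cons, List.map_nil, ih]
      refine Prod.ext rfl (Prod.ext rfl (Prod.ext rfl ?_))
      push_cast; ring

-- The claim, with L instantiated to r2.length.
theorem preprocess_rgb_spec : Claim_equal_preprocess_rgb := by
  intro r1 g1 b1 r2 g2 b2 _hDom _hPre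
  simp only [Spec_preprocess_rgb, preprocess_rgb, preprocess_rgb_alt]
  rw [preprocess_rgb_loop1 r1 g1 b1 r2 g2 b2 (r2.length : Int) r2.length]
  simp only [List.append_assoc]
  rw [PySem.List.foldl_append_eq_flatMap, PySem.List.foldl_append_eq_flatMap]
  simp only [List.nil_append]
  apply List.flatMap_congr  -- congruence over members of the range
  intro i hi
  obtain ⟨h0, hlt⟩ := (PySem.List.mem_pyRange_one).1 hi
  rw [PySem.List.pyGetD_map_pyRange_of_nonneg _ _ _ _ h0 hlt,
      PySem.List.pyGetD_map_pyRange_of_nonneg _ _ _ _ h0 hlt,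
      PySem.List.pyGetD_map_pyRange_of_nonneg _ _ _ _ h0 hlt]
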